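-- pv_equiv track=rewrite | github.com/jtcrank/aoc | 2024/day_02/part_2.py | evaluate_report
-- ===== SOURCE A (Python) =====
-- def evaluate_report(report):
--     prev_delta = None
--
--     for i in range(len(report) - 1):
--         delta = report[i+1] - report[i]
--
--         if (
--             (abs(delta) < 1 or abs(delta) > 3)
--             or
--             (prev_delta and prev_delta * delta <= 0)
--         ):
--             return False
--
--         prev_delta = delta
--
--     return True
-- ===== SOURCE B (Python) =====
-- def evaluate_report(report):
--     seq = list(report)
--     if seq != sorted(seq) and seq != sorted(seq, reverse=True):
--         return False
--     return all(1 <= abs(b - a) <= 3 for a, b in zip(seq, seq[1:]))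
-- ===== Notes on version B (the rewrite author's own statement) =====
-- stated objective: simpler
-- what changed: Replaces A's stateful single pass (tracking the previous delta and its sign) with a direction test by comparing the list to its sorted ascending/descending forms plus a one-line bounded-gap check over adjacent pairs.
import Mathlib
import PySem

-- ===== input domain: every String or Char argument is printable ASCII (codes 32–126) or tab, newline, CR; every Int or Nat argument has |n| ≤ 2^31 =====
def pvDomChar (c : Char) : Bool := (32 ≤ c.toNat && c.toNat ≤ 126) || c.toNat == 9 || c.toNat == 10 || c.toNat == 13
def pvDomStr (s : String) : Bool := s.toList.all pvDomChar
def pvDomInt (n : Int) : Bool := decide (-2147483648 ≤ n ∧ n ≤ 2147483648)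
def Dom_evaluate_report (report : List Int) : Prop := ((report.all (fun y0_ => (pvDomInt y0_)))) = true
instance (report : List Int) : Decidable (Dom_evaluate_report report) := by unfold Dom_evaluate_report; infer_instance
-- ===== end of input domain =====

-- B replaces A's stateful single pass (previous-delta sign tracking) with a sort-based
-- monotonicity test plus a bounded-gap check over adjacent pairs; objective: simpler.

-- ===== PORT A =====
-- the 'for i in range(len(report) - 1)' loop with early return and prev_delta state
def evalLoopA (report : List Int) : List Int → Option Int → Bool
  | [], _ => true
  | i :: rest, prev =>
    match PySem.List.pyGet? report (i + 1), PySem.List.pyGet? report i with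
    | some x1, some x0 =>
      let delta := x1 - x0
      if (decide (|delta| < 1) || decide (|delta| > 3))
         || (match prev with
             | some p => decide (p ≠ 0) && decide (p * delta ≤ 0)
             | none => false) then false
      else evalLoopA report rest (some delta)
    | _, _ => false  -- IndexError (unreachable: A's indices are always in range)

def evaluate_report (report : List Int) : Bool :=
  evalLoopA report (PySem.List.pyRange 0 ((report.length : Int) - 1)) none

-- ===== PORT B =====
def evaluate_report_alt (report : List Int) : Bool :=
  let seq := report
  if ¬ (seq = PySem.List.sorted seq (fun x => x)) ∧
     ¬ (seq = PySem.List.sorted seq (fun x => x) true) then false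
  else (seq.zip (PySem.List.slice seq (some 1) none)).all
        (fun p => decide (1 ≤ |p.2 - p.1| ∧ |p.2 - p.1| ≤ 3))

-- ===== PRECONDITION & SPEC =====
def Spec_evaluate_report (report : List Int) (out : Bool) : Prop := out = evaluate_report_alt report
instance (report : List Int) (out : Bool) : Decidable (Spec_evaluate_report report out) := by unfold Spec_evaluate_report; infer_instance

-- ===== CLAIM (what is proved, stated in full; the proofs are below) =====
def Claim_equal_evaluate_report : Prop := ∀ (report : List Int), Dom_evaluate_report report → Spec_evaluate_report report (evaluate_report report)

-- ===== LEMMAS AND PROOFS =====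

theorem pyRange_nil {a b : Int} (h : b ≤ a) : PySem.List.pyRange a b = [] := by
  simp [PySem.List.pyRange, not_lt.mpr h]

/-- adjacent-pair boolean chain: f holds between each pair of neighbours -/
def chainB (f : Int → Int → Bool) : List Int → Bool
  | a :: b :: rest => f a b && chainB f (b :: rest)
  | _ => true

def upB (a b : Int) : Bool := decide (1 ≤ b - a ∧ b - a ≤ 3)
def downB (a b : Int) : Bool := decide (1 ≤ a - b ∧ a - b ≤ 3)
def leB (a b : Int) : Bool := decide (a ≤ b)
def geB (a b : Int) : Bool := decide (b ≤ a)
def gapB (a b : Int) : Bool := decide (1 ≤ |b - a| ∧ |b - a| ≤ 3)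

/-- A's loop re-expressed structurally on the list of values -/
def pairsA (prev : Option Int) : List Int → Bool
  | [] => true
  | [_] => true
  | a :: b :: rest =>
    let delta := b - a
    if (decide (|delta| < 1) || decide (|delta| > 3))
       || (match prev with
           | some p => decide (p ≠ 0) && decide (p * delta ≤ 0)
           | none => false) then false
    else pairsA (some delta) (b :: rest)

theorem bridgeA : ∀ (tail pre : List Int) (prev : Option Int),
    evalLoopA (pre ++ tail)
      (PySem.List.pyRange (pre.length : Int) (((pre ++ tail).length : Int) - 1)) prev
    = pairsA prev tail
  | [], pre, prev => by
    rw [pyRange_nil (by simp)]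
    rfl
  | [a], pre, prev => by
    rw [pyRange_nil (by simp)]
    rfl
  | a :: b :: rest, pre, prev => by
    have hlt : (pre.length : Int) < ((pre ++ a :: b :: rest).length : Int) - 1 := by
      simp only [List.length_append, List.length_cons]
      push_cast
      omega
    rw [PySem.List.pyRange_one_cons hlt]
    have h0 : PySem.List.pyGet? (pre ++ a :: b :: rest) (pre.length : Int) = some a :=
      PySem.List.pyGet?_append_length pre _ a
    have h1 : PySem.List.pyGet? (pre ++ a :: b :: rest) ((pre.length : Int) + 1) = some b := by
      have := PySem.List.pyGet?_append_length (pre ++ [a]) rest b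
      simpa [List.append_assoc] using this
    have ih := bridgeA (b :: rest) (pre ++ [a])
    have e1 : (pre ++ [a]) ++ b :: rest = pre ++ a :: b :: rest := by
      simp [List.append_assoc]
    have e2 : (((pre ++ [a]).length : Nat) : Int) = (pre.length : Int) + 1 := by
      simp
    cases prev with
    | none =>
      rw [evalLoopA]
      simp only [h1, h0, pairsA]
      by_cases hc : ((decide (|b - a| < 1) || decide (|b - a| > 3)) || false) = true
      · rw [if_pos hc, if_pos hc]
      · rw [if_neg hc, if_neg hc]
        have ih' := ih (some (b - a))
        rw [e1, e2] at ih'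
        exact ih'
    | some p =>
      rw [evalLoopA]
      simp only [h1, h0, pairsA]
      by_cases hc : ((decide (|b - a| < 1) || decide (|b - a| > 3))
          || (decide (p ≠ 0) && decide (p * (b - a) ≤ 0))) = true
      · rw [if_pos hc, if_pos hc]
      · rw [if_neg hc, if_neg hc]
        have ih' := ih (some (b - a))
        rw [e1, e2] at ih'
        exact ih'

theorem A_eq_pairs (xs : List Int) : evaluate_report xs = pairsA none xs := by
  have := bridgeA xs [] none
  simpa [evaluate_report] using this

theorem chainB_eq_isChain (f : Int → Int → Bool) :
    ∀ xs : List Int, chainB f xs = true ↔ List.IsChain (fun a b => f a b = true) xs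
  | [] => by simp [chainB]
  | [a] => by simp [chainB]
  | a :: b :: rest => by
    rw [chainB, Bool.and_eq_true, List.isChain_cons_cons, chainB_eq_isChain f (b :: rest)]

theorem chainB_and (f g : Int → Int → Bool) :
    ∀ xs : List Int, chainB (fun a b => f a b && g a b) xs = (chainB f xs && chainB g xs)
  | [] => by simp [chainB]
  | [a] => by simp [chainB]
  | a :: b :: rest => by
    rw [chainB, chainB, chainB, chainB_and f g (b :: rest)]
    cases f a b <;> cases g a b <;> simp

theorem chainB_congr {f g : Int → Int → Bool} (h : ∀ a b, f a b = g a b) (xs : List Int) :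
    chainB f xs = chainB g xs := by
  have : f = g := funext fun a => funext fun b => h a b
  rw [this]

theorem allZip_eq_chainB (f : Int × Int → Bool) :
    ∀ xs : List Int, (xs.zip xs.tail).all f = chainB (fun a b => f (a, b)) xs
  | [] => by simp [chainB]
  | [a] => by simp [chainB]
  | a :: b :: rest => by
    show ((a, b) :: (b :: rest).zip rest).all f = _
    rw [List.all_cons, chainB]
    congr 1
    exact allZip_eq_chainB f (b :: rest)

theorem pairsA_pos : ∀ (xs : List Int) (p : Int), 0 < p →
    pairsA (some p) xs = chainB upB xs
  | [], _, _ => by simp [pairsA, chainB]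
  | [a], _, _ => by simp [pairsA, chainB]
  | a :: b :: rest, p, hp => by
    rw [pairsA, chainB]
    by_cases hu : 1 ≤ b - a ∧ b - a ≤ 3
    · have habs : |b - a| = b - a := abs_of_pos (by omega)
      have hmul : (decide (p * (b - a) ≤ 0)) = false :=
        decide_eq_false (not_le.mpr (mul_pos hp (by omega)))
      have hc : ((decide (|b - a| < 1) || decide (|b - a| > 3))
          || (decide (p ≠ 0) && decide (p * (b - a) ≤ 0))) = false := by
        simp only [habs, hmul, Bool.and_false, Bool.or_false, Bool.or_eq_false_iff,
          decide_eq_false_iff_not]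
        omega
      rw [if_neg (by rw [hc]; exact Bool.false_ne_true)]
      rw [pairsA_pos (b :: rest) (b - a) (by omega)]
      have hub : upB a b = true := by simp only [upB, decide_eq_true_eq]; omega
      rw [hub, Bool.true_and]
    · have hub : upB a b = false := by
        simp only [upB, decide_eq_false_iff_not]; omega
      rw [hub, Bool.false_and]
      have hc : ((decide (|b - a| < 1) || decide (|b - a| > 3))
          || (decide (p ≠ 0) && decide (p * (b - a) ≤ 0))) = true := by
        rcases abs_cases (b - a) with ⟨h1, h2⟩ | ⟨h1, h2⟩
        · simp only [h1, Bool.or_eq_true, Bool.and_eq_true, decide_eq_true_eq]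
          exact Or.inl (by omega)
        · have hm : p * (b - a) ≤ 0 := le_of_lt (mul_neg_of_pos_of_neg hp h2)
          simp only [Bool.or_eq_true, Bool.and_eq_true, decide_eq_true_eq]
          exact Or.inr ⟨by omega, hm⟩
      rw [if_pos hc]

theorem pairsA_neg : ∀ (xs : List Int) (p : Int), p < 0 →
    pairsA (some p) xs = chainB downB xs
  | [], _, _ => by simp [pairsA, chainB]
  | [a], _, _ => by simp [pairsA, chainB]
  | a :: b :: rest, p, hp => by
    rw [pairsA, chainB]
    by_cases hd : 1 ≤ a - b ∧ a - b ≤ 3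
    · have habs : |b - a| = -(b - a) := abs_of_neg (by omega)
      have hmul : (decide (p * (b - a) ≤ 0)) = false :=
        decide_eq_false (not_le.mpr (mul_pos_of_neg_of_neg hp (by omega)))
      have hc : ((decide (|b - a| < 1) || decide (|b - a| > 3))
          || (decide (p ≠ 0) && decide (p * (b - a) ≤ 0))) = false := by
        simp only [habs, hmul, Bool.and_false, Bool.or_false, Bool.or_eq_false_iff,
          decide_eq_false_iff_not]
        omega
      rw [if_neg (by rw [hc]; exact Bool.false_ne_true)]
      rw [pairsA_neg (b :: rest) (b - a) (by omega)]
      have hdb : downB a b = true := by simp only [downB, decide_eq_true_eq]; omega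
      rw [hdb, Bool.true_and]
    · have hdb : downB a b = false := by
        simp only [downB, decide_eq_false_iff_not]; omega
      rw [hdb, Bool.false_and]
      have hc : ((decide (|b - a| < 1) || decide (|b - a| > 3))
          || (decide (p ≠ 0) && decide (p * (b - a) ≤ 0))) = true := by
        rcases abs_cases (b - a) with ⟨h1, h2⟩ | ⟨h1, h2⟩
        · by_cases hz : b - a = 0
          · simp only [h1, Bool.or_eq_true, decide_eq_true_eq]
            exact Or.inl (Or.inl (by omega))
          · have hm : p * (b - a) ≤ 0 := le_of_lt (mul_neg_of_neg_of_pos hp (by omega))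
            simp only [Bool.or_eq_true, Bool.and_eq_true, decide_eq_true_eq]
            exact Or.inr ⟨by omega, hm⟩
        · simp only [h1, Bool.or_eq_true, Bool.and_eq_true, decide_eq_true_eq]
          exact Or.inl (by omega)
      rw [if_pos hc]

theorem pairsA_none : ∀ xs : List Int,
    pairsA none xs = (chainB upB xs || chainB downB xs)
  | [] => by simp [pairsA, chainB]
  | [a] => by simp [pairsA, chainB]
  | a :: b :: rest => by
    rw [pairsA]
    by_cases hu : 1 ≤ b - a ∧ b - a ≤ 3
    · have habs : |b - a| = b - a := abs_of_pos (by omega)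
      have hc : ((decide (|b - a| < 1) || decide (|b - a| > 3)) || false) = false := by
        simp only [habs, Bool.or_false, Bool.or_eq_false_iff, decide_eq_false_iff_not]
        omega
      rw [if_neg (by rw [hc]; exact Bool.false_ne_true)]
      rw [pairsA_pos (b :: rest) (b - a) (by omega)]
      have h1 : chainB upB (a :: b :: rest) = chainB upB (b :: rest) := by
        rw [chainB]
        have : upB a b = true := by simp only [upB, decide_eq_true_eq]; omega
        rw [this, Bool.true_and]
      have h2 : chainB downB (a :: b :: rest) = false := by
        rw [chainB]
        have : downB a b = false := by simp only [downB, decide_eq_false_iff_not]; omega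
        rw [this, Bool.false_and]
      rw [h1, h2, Bool.or_false]
    · by_cases hd : 1 ≤ a - b ∧ a - b ≤ 3
      · have habs : |b - a| = -(b - a) := abs_of_neg (by omega)
        have hc : ((decide (|b - a| < 1) || decide (|b - a| > 3)) || false) = false := by
          simp only [habs, Bool.or_false, Bool.or_eq_false_iff, decide_eq_false_iff_not]
          omega
        rw [if_neg (by rw [hc]; exact Bool.false_ne_true)]
        rw [pairsA_neg (b :: rest) (b - a) (by omega)]
        have h1 : chainB downB (a :: b :: rest) = chainB downB (b :: rest) := by
          rw [chainB]
          have : downB a b = true := by simp only [downB, decide_eq_true_eq]; omega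
          rw [this, Bool.true_and]
        have h2 : chainB upB (a :: b :: rest) = false := by
          rw [chainB]
          have : upB a b = false := by simp only [upB, decide_eq_false_iff_not]; omega
          rw [this, Bool.false_and]
        rw [h1, h2, Bool.false_or]
      · have hc : ((decide (|b - a| < 1) || decide (|b - a| > 3)) || false) = true := by
          rcases abs_cases (b - a) with ⟨h1, h2⟩ | ⟨h1, h2⟩ <;>
            (simp only [h1, Bool.or_false, Bool.or_eq_true, decide_eq_true_eq]; omega)
        rw [if_pos hc]
        have h1 : chainB upB (a :: b :: rest) = false := by
          rw [chainB]
          have : upB a b = false := by simp only [upB, decide_eq_false_iff_not]; omega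
          rw [this, Bool.false_and]
        have h2 : chainB downB (a :: b :: rest) = false := by
          rw [chainB]
          have : downB a b = false := by simp only [downB, decide_eq_false_iff_not]; omega
          rw [this, Bool.false_and]
        rw [h1, h2]
        rfl

theorem sorted_asc_iff (xs : List Int) :
    xs = PySem.List.sorted xs (fun x => x) ↔ chainB leB xs = true := by
  rw [chainB_eq_isChain]
  constructor
  · intro h
    have hp : List.Pairwise (fun a b : Int => a ≤ b) xs := by
      have := PySem.List.sorted_pairwise xs (fun x : Int => x)
      rw [← h] at this
      simpa using this
    have := hp.isChain
    simpa [leB] using this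
  · intro h
    have hch : List.IsChain (fun a b : Int => a ≤ b) xs := by
      simpa [leB] using h
    have hp : List.Pairwise (fun a b : Int => a ≤ b) xs := List.isChain_iff_pairwise.mp hch
    exact (PySem.List.sorted_eq_self_of_pairwise xs (fun x => x) (by simpa using hp)).symm

theorem sorted_desc_iff (xs : List Int) :
    xs = PySem.List.sorted xs (fun x => x) true ↔ chainB geB xs = true := by
  rw [chainB_eq_isChain]
  constructor
  · intro h
    have hp : List.Pairwise (fun a b : Int => b ≤ a) xs := by
      have := PySem.List.sorted_pairwise_rev xs (fun x : Int => x)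
      rw [← h] at this
      simpa using this
    have := hp.isChain
    simpa [geB] using this
  · intro h
    have hch : List.IsChain (fun a b : Int => b ≤ a) xs := by
      simpa [geB] using h
    haveI : Trans (fun a b : Int => b ≤ a) (fun a b : Int => b ≤ a) (fun a b : Int => b ≤ a) :=
      ⟨fun h1 h2 => le_trans h2 h1⟩
    have hp : List.Pairwise (fun a b : Int => b ≤ a) xs := List.isChain_iff_pairwise.mp hch
    exact (PySem.List.sorted_rev_eq_self_of_pairwise xs (fun x => x) (by simpa using hp)).symm

theorem up_split (a b : Int) : (leB a b && gapB a b) = upB a b := by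
  have h : (a ≤ b ∧ (1 ≤ |b - a| ∧ |b - a| ≤ 3)) ↔ (1 ≤ b - a ∧ b - a ≤ 3) := by
    rcases abs_cases (b - a) with ⟨h1, h2⟩ | ⟨h1, h2⟩ <;> rw [h1] <;> omega
  simp only [leB, gapB, upB]
  rw [(Bool.decide_and (a ≤ b) (1 ≤ |b - a| ∧ |b - a| ≤ 3)).symm]
  exact decide_eq_decide.mpr h

theorem down_split (a b : Int) : (geB a b && gapB a b) = downB a b := by
  have h : (b ≤ a ∧ (1 ≤ |b - a| ∧ |b - a| ≤ 3)) ↔ (1 ≤ a - b ∧ a - b ≤ 3) := by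
    rcases abs_cases (b - a) with ⟨h1, h2⟩ | ⟨h1, h2⟩ <;> rw [h1] <;> omega
  simp only [geB, gapB, downB]
  rw [(Bool.decide_and (b ≤ a) (1 ≤ |b - a| ∧ |b - a| ≤ 3)).symm]
  exact decide_eq_decide.mpr h

theorem alt_eq_chains (xs : List Int) :
    evaluate_report_alt xs = (chainB upB xs || chainB downB xs) := by
  have hgap : (xs.zip (PySem.List.slice xs (some 1) none)).all
      (fun p => decide (1 ≤ |p.2 - p.1| ∧ |p.2 - p.1| ≤ 3)) = chainB gapB xs := by
    rw [PySem.List.slice_from_one]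
    exact allZip_eq_chainB _ xs
  have hup : chainB upB xs = (chainB leB xs && chainB gapB xs) := by
    rw [← chainB_and]
    exact (chainB_congr up_split xs).symm
  have hdown : chainB downB xs = (chainB geB xs && chainB gapB xs) := by
    rw [← chainB_and]
    exact (chainB_congr down_split xs).symm
  unfold evaluate_report_alt
  simp only []
  split_ifs with h
  · rw [hup, hdown]
    have hl : chainB leB xs = false := by
      cases h' : chainB leB xs
      · rfl
      · exact absurd ((sorted_asc_iff xs).mpr h') h.1
    have hg : chainB geB xs = false := by
      cases h' : chainB geB xs
      · rfl
      · exact absurd ((sorted_desc_iff xs).mpr h') h.2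
    rw [hl, hg]
    simp
  · rw [hgap, hup, hdown]
    rcases not_and_or.mp h with h' | h'
    · have hl : chainB leB xs = true := (sorted_asc_iff xs).mp (not_not.mp h')
      rw [hl]
      cases chainB geB xs <;> cases chainB gapB xs <;> simp
    · have hg : chainB geB xs = true := (sorted_desc_iff xs).mp (not_not.mp h')
      rw [hg]
      cases chainB leB xs <;> cases chainB gapB xs <;> simp

-- ===== VERDICT (by name: the statement is the Claim_ definition above) =====
theorem evaluate_report_spec : Claim_equal_evaluate_report := by
  intro xs _
  show evaluate_report xs = evaluate_report_alt xs
  rw [A_eq_pairs, pairsA_none, alt_eq_chains]
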